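-- pv_equiv track=rewrite | github.com/ZeroNot0/SLGMONITOR | frontend/convert_excel_with_format.py | _build_product_rule_sets
-- ===== SOURCE A (Python) =====
-- def _norm_str(val) -> str:
--     return str(val).strip().lower() if val is not None else ""
--
-- def _build_product_rule_sets(product_rules: dict):
--     def _collect(key, by_value):
--         out = set()
--         for item in product_rules.get(key, []):
--             if not isinstance(item, dict):
--                 continue
--             if item.get("by") != by_value:
--                 continue
--             val = item.get("value")
--             if val is None:
--                 continue
--             v = _norm_str(val)
--             if v:
--                 out.add(v)
--         return out
--
--     return {
--         "yellow_name": _collect("yellow", "product_name"),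
--         "yellow_id": _collect("yellow", "unified_id"),
--     }
-- ===== SOURCE B (Python) =====
-- def _norm_str(val) -> str:
--     return str(val).strip().lower() if val is not None else ""
--
-- def _build_product_rule_sets(product_rules: dict):
--     yellow_name = set()
--     yellow_id = set()
--     for item in product_rules.get("yellow", []):
--         if not isinstance(item, dict):
--             continue
--         val = item.get("value")
--         if val is None:
--             continue
--         v = _norm_str(val)
--         if not v:
--             continue
--         by = item.get("by")
--         if by == "product_name":
--             yellow_name.add(v)
--         elif by == "unified_id":
--             yellow_id.add(v)
--     return {"yellow_name": yellow_name, "yellow_id": yellow_id}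
-- ===== Notes on version B (the rewrite author's own statement) =====
-- stated objective: simpler
-- what changed: One dispatching pass over the yellow rule list that routes each item into the name set or the id set by its 'by' field, replacing the nested _collect helper called twice (two filtered scans of the same list).
import Mathlib
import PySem

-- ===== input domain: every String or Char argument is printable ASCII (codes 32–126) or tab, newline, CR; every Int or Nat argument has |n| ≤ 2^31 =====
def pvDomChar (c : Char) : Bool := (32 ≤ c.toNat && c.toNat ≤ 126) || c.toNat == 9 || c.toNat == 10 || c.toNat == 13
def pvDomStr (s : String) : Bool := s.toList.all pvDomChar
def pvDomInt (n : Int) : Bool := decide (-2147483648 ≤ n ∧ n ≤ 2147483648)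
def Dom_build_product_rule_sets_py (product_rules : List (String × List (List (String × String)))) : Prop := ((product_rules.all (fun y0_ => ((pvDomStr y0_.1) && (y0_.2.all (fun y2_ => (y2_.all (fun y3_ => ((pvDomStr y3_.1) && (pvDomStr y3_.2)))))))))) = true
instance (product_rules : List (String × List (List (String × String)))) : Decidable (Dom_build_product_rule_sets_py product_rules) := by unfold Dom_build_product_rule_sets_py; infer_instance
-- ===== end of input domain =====

-- ===== PORT A =====
-- B is one dispatching pass over the "yellow" list instead of A's two filtered scans; equal output proved total.
-- str(val).strip().lower() for a string val (A's _norm_str; in this typing val is never None)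
def pvNormStr (s : String) : String := PySem.Str.lower (PySem.Str.strip s)

-- A's _collect("yellow", by_value); the isinstance(item, dict) guard is vacuous under the typing (items are dicts)
def pvCollect (product_rules : List (String × List (List (String × String)))) (by_value : String) : PySem.Set String :=
  (PySem.Dict.getD (PySem.Dict.mk product_rules) "yellow" []).foldl
    (fun out item =>
      if PySem.Dict.get? (PySem.Dict.mk item) "by" ≠ some by_value then out
      else
        match PySem.Dict.get? (PySem.Dict.mk item) "value" with
        | none => out
        | some val =>
          let v := pvNormStr val
          if v ≠ "" then PySem.Set.add out v else out)
    (PySem.Set.empty)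

def build_product_rule_sets_py (product_rules : List (String × List (List (String × String)))) : List (String × List String) :=
  [("yellow_name", pvCollect product_rules "product_name"),
   ("yellow_id", pvCollect product_rules "unified_id")]

-- ===== PORT B =====
-- B's loop body: one item updates the (yellow_name, yellow_id) pair
def pvStepB (acc : PySem.Set String × PySem.Set String) (item : List (String × String)) :
    PySem.Set String × PySem.Set String :=
  match PySem.Dict.get? (PySem.Dict.mk item) "value" with
  | none => acc
  | some val =>
    let v := pvNormStr val
    if v = "" then acc
    else
      let by_ := PySem.Dict.get? (PySem.Dict.mk item) "by"
      if by_ = some "product_name" then (PySem.Set.add acc.1 v, acc.2)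
      else if by_ = some "unified_id" then (acc.1, PySem.Set.add acc.2 v)
      else acc

def build_product_rule_sets_py_alt (product_rules : List (String × List (List (String × String)))) : List (String × List String) :=
  let p := (PySem.Dict.getD (PySem.Dict.mk product_rules) "yellow" []).foldl pvStepB (PySem.Set.empty, PySem.Set.empty)
  [("yellow_name", p.1), ("yellow_id", p.2)]

-- ===== PRECONDITION & SPEC =====
def Spec_build_product_rule_sets_py (product_rules : List (String × List (List (String × String)))) (out : List (String × List String)) : Prop := out = build_product_rule_sets_py_alt product_rules
instance (product_rules : List (String × List (List (String × String)))) (out : List (String × List String)) : Decidable (Spec_build_product_rule_sets_py product_rules out) := by unfold Spec_build_product_rule_sets_py; infer_instance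

-- ===== CLAIM (what is proved, stated in full; the proofs are below) =====
def Claim_equal_build_product_rule_sets_py : Prop := ∀ (product_rules : List (String × List (List (String × String)))), Dom_build_product_rule_sets_py product_rules → Spec_build_product_rule_sets_py product_rules (build_product_rule_sets_py product_rules)

-- ===== LEMMAS AND PROOFS =====
-- A's per-item step for one target by_value
def pvStepA (by_value : String) (out : PySem.Set String) (item : List (String × String)) : PySem.Set String :=
  if PySem.Dict.get? (PySem.Dict.mk item) "by" ≠ some by_value then out
  else
    match PySem.Dict.get? (PySem.Dict.mk item) "value" with
    | none => out
    | some val =>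
      let v := pvNormStr val
      if v ≠ "" then PySem.Set.add out v else out

lemma pvStepB_eq (acc : PySem.Set String × PySem.Set String) (item : List (String × String)) :
    pvStepB acc item = (pvStepA "product_name" acc.1 item, pvStepA "unified_id" acc.2 item) := by
  unfold pvStepB pvStepA
  cases hv : PySem.Dict.get? (PySem.Dict.mk item) "value" with
  | none => simp
  | some val =>
    simp only
    by_cases hby : PySem.Dict.get? (PySem.Dict.mk item) "by" = some "product_name"
    · have hby2 : PySem.Dict.get? (PySem.Dict.mk item) "by" ≠ some "unified_id" := by simp [hby]
      by_cases he : pvNormStr val = "" <;> simp [hby, hby2, he]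
    · by_cases hby2 : PySem.Dict.get? (PySem.Dict.mk item) "by" = some "unified_id"
      · by_cases he : pvNormStr val = "" <;> simp [hby2, he]
      · by_cases he : pvNormStr val = "" <;> simp [hby, hby2, he]

lemma pvFold_pair (xs : List (List (String × String))) (a b : PySem.Set String) :
    xs.foldl pvStepB (a, b)
      = (xs.foldl (pvStepA "product_name") a, xs.foldl (pvStepA "unified_id") b) := by
  induction xs generalizing a b with
  | nil => rfl
  | cons x xs ih => simp only [List.foldl_cons, pvStepB_eq]; exact ih _ _

-- ===== VERDICT (by name: the statement is the Claim_ definition above) =====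
theorem build_product_rule_sets_py_spec : Claim_equal_build_product_rule_sets_py := by
  intro pr _
  unfold Spec_build_product_rule_sets_py build_product_rule_sets_py build_product_rule_sets_py_alt pvCollect
  rw [pvFold_pair]
  rfl
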